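-- pv_equiv track=rewrite | github.com/Deutsches-Klimarechenzentrum/2catalogs | .github/scripts/forge_parser.py | parse_issue_body
-- ===== SOURCE A (Python) =====
-- from typing import Dict, Optional
--
-- def parse_issue_body(body: str) -> Dict[str, str]:
--     """
--     Parse the GitHub issue body and extract form fields.
--
--     GitHub issue forms create a specific format like:
--     ### Field Label
--     field value
--     """
--     fields = {}
--     lines = body.split('\n')
--     current_field = None
--     current_value = []
--
--     for line in lines:
--         # Check if this is a field header (starts with ###)
--         if line.startswith('###'):
--             # Save previous field if exists
--             if current_field:
--                 fields[current_field] = '\n'.join(current_value).strip()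
--
--             # Start new field
--             current_field = line.replace('###', '').strip()
--             current_value = []
--         elif current_field:
--             # Add to current field value
--             if line.strip() and not line.startswith('_No response_'):
--                 current_value.append(line.strip())
--
--     # Save last field
--     if current_field:
--         fields[current_field] = '\n'.join(current_value).strip()
--
--     return fields
-- ===== SOURCE B (Python) =====
-- def parse_issue_body(body: str):
--     """Section-chunking reimplementation: skip the preamble, then for each
--     header line consume its block of value lines with an inner loop."""
--     fields = {}
--     lines = body.split('\n')
--     n = len(lines)
--     i = 0
--     while i < n and not lines[i].startswith('###'):
--         i += 1
--     while i < n: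
--         name = lines[i].replace('###', '').strip()
--         vals = []
--         j = i + 1
--         while j < n and not lines[j].startswith('###'):
--             s = lines[j].strip()
--             if s and not lines[j].startswith('_No response_'):
--                 vals.append(s)
--             j += 1
--         if name:
--             fields[name] = '\n'.join(vals).strip()
--         i = j
--     return fields
-- ===== Notes on version B (the rewrite author's own statement) =====
-- stated objective: alternative
-- what changed: A's single-pass state machine (current_field/current_value accumulators mutated line by line) is replaced by section chunking: skip the preamble, then for each header line an inner loop consumes its block of lines up to the next header, filters/strips them and assigns the joined value at once.
import Mathlib
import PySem

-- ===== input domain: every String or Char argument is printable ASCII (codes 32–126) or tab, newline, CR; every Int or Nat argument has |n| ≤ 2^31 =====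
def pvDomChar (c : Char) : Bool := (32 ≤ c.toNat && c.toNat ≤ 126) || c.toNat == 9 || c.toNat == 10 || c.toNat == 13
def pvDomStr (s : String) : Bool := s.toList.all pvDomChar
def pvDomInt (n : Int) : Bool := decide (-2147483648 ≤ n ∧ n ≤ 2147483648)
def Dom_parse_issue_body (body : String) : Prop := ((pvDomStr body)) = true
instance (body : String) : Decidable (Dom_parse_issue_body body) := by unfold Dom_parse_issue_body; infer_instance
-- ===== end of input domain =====

-- B re-decomposes A's single-pass state machine into section chunking (skip the preamble,
-- then an inner loop per header line); same cost, objective: alternative decomposition.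

-- ===== PORT A =====
-- A's for-loop as structural recursion over the lines, state = (fields, current_field, current_value)
def aLoop : List String → PySem.Dict String String → Option String → List String → PySem.Dict String String
  | [], d, cf, cv =>
    match cf with
    | some f => if f ≠ "" then d.insert f (PySem.Str.strip (PySem.Str.join "\n" cv)) else d
    | none => d
  | l :: ls, d, cf, cv =>
    if PySem.Str.startswith l "###" then
      let d' :=
        match cf with
        | some f => if f ≠ "" then d.insert f (PySem.Str.strip (PySem.Str.join "\n" cv)) else d
        | none => d
      aLoop ls d' (some (PySem.Str.strip (PySem.Str.replace l "###" ""))) []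
    else
      match cf with
      | some f =>
        if f ≠ "" then
          aLoop ls d cf
            (if PySem.Str.strip l ≠ "" ∧ PySem.Str.startswith l "_No response_" = false
             then cv ++ [PySem.Str.strip l] else cv)
        else aLoop ls d cf cv
      | none => aLoop ls d cf cv

def parse_issue_body (body : String) : List (String × String) :=
  (aLoop ((PySem.Str.split? body "\n").getD []) PySem.Dict.empty none []).items

-- ===== PORT B =====
-- the inner while: collect the stripped value lines of a section and return the rest
def pvSeg : List String → List String × List String
  | [] => ([], [])
  | x :: xs =>
    if PySem.Str.startswith x "###" then ([], x :: xs)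
    else
      let r := pvSeg xs
      ((if PySem.Str.strip x ≠ "" ∧ PySem.Str.startswith x "_No response_" = false
        then PySem.Str.strip x :: r.1 else r.1), r.2)

theorem pvSeg_snd_length_le : ∀ xs : List String, (pvSeg xs).2.length ≤ xs.length := by
  intro xs
  induction xs with
  | nil => simp [pvSeg]
  | cons x xs ih =>
    simp only [pvSeg]
    split
    · simp
    · split <;> simpa using Nat.le_succ_of_le ih

-- the outer while: one step per section
def bSections : List String → PySem.Dict String String → PySem.Dict String String
  | [], d => d
  | x :: xs, d =>
    let name := PySem.Str.strip (PySem.Str.replace x "###" "")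
    let r := pvSeg xs
    let d' := if name ≠ "" then d.insert name (PySem.Str.strip (PySem.Str.join "\n" r.1)) else d
    bSections r.2 d'
termination_by l _ => l.length
decreasing_by exact Nat.lt_succ_of_le (pvSeg_snd_length_le xs)

-- the first while: skip the preamble before the first header
def pvSkip : List String → List String
  | [] => []
  | x :: xs => if PySem.Str.startswith x "###" then x :: xs else pvSkip xs

def parse_issue_body_alt (body : String) : List (String × String) :=
  (bSections (pvSkip ((PySem.Str.split? body "\n").getD [])) PySem.Dict.empty).items

-- ===== PRECONDITION & SPEC =====
def Spec_parse_issue_body (body : String) (out : List (String × String)) : Prop := out = parse_issue_body_alt body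
instance (body : String) (out : List (String × String)) : Decidable (Spec_parse_issue_body body out) := by unfold Spec_parse_issue_body; infer_instance

-- ===== CLAIM (what is proved, stated in full; the proofs are below) =====
def Claim_equal_parse_issue_body : Prop := ∀ (body : String), Dom_parse_issue_body body → Spec_parse_issue_body body (parse_issue_body body)

-- ===== LEMMAS AND PROOFS =====

-- from a live header state, A's fold processes exactly one B-section
theorem aLoop_section : ∀ (ls : List String) (d : PySem.Dict String String) (f : String) (cv : List String),
    aLoop ls d (some f) cv =
      bSections (pvSeg ls).2
        (if f ≠ "" then d.insert f (PySem.Str.strip (PySem.Str.join "\n" (cv ++ (pvSeg ls).1))) else d) := by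
  intro ls
  induction ls with
  | nil => intro d f cv; simp [aLoop, pvSeg, bSections]
  | cons l ls ih =>
    intro d f cv
    by_cases hl : PySem.Str.startswith l "###" = true
    · simp only [aLoop, if_pos hl, pvSeg, bSections]
      rw [ih]
      simp
    · by_cases hf : f = ""
      · subst hf
        simp only [aLoop, pvSeg, if_neg hl, ne_eq, not_true_eq_false,
          if_false]
        rw [ih]
        simp
      · simp only [aLoop, if_neg hl, pvSeg, if_pos (show f ≠ "" from hf)]
        rw [ih]
        simp only [ne_eq, hf, not_false_iff, if_pos]
        split_ifs <;> simp

-- before the first header, A's fold just skips lines, like B's first while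
theorem aLoop_skip : ∀ (ls : List String) (d : PySem.Dict String String),
    aLoop ls d none [] = bSections (pvSkip ls) d := by
  intro ls
  induction ls with
  | nil => intro d; simp [aLoop, pvSkip, bSections]
  | cons l ls ih =>
    intro d
    by_cases hl : PySem.Str.startswith l "###" = true
    · simp only [aLoop, pvSkip, if_pos hl]
      rw [aLoop_section]
      simp [bSections]
    · simp only [aLoop, pvSkip, if_neg hl]
      exact ih d

-- ===== VERDICT (by name: the statement is the Claim_ definition above) =====
theorem parse_issue_body_spec : Claim_equal_parse_issue_body := by
  intro body _
  unfold Spec_parse_issue_body parse_issue_body parse_issue_body_alt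
  rw [aLoop_skip]
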